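-- pv_equiv track=rewrite | github.com/shyok0/String_parser-from_document | parser.py | analyse_string
-- ===== SOURCE A (Python) =====
-- def analyse_string(string_list, delete, start, end, lower_case):
--     delete_items = []  # To delete null items in the string_list
--
--     # If there is something in delete list
--     if delete is not None:
--         for i in range(0, len(string_list)):
--                 for char in delete:
--                     string_list[i] = string_list[i].replace(char, '')
--
--     # Main loop
--     for i in range(0, len(string_list)):
--         skip_item = False  # skip all loops
--
--         # skip null or number items
--         if len(string_list[i]) == 0 or string_list[i].isdigit():
--             skip_item = True
--             delete_items.append(i)
--         elif not skip_item:
--             # end char removal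
--             while string_list[i][-1] in end:
--                 string_list[i] = string_list[i][:-1]
--                 if len(string_list[i]) == 0:
--                     skip_item = True
--                     delete_items.append(i)
--                     break
--             # start char removal
--             if not skip_item:
--                 while string_list[i][0] in start:
--                     string_list[i] = string_list[i][1:]
--                     if len(string_list[i]) == 0:
--                         skip_item = True
--                         delete_items.append(i)
--                         break
--
--     string_list = delete_null_items(string_list, delete_items)
--     if lower_case:
--         list_lower(string_list)
--
--     return string_list
--
-- def delete_null_items(string_list, delete_items):
--     if len(delete_items) > 0:
--         offset = 0
--         for i in delete_items:
--             del string_list[int(i) - offset]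
--             offset += 1
--     return string_list
--
-- def list_lower(string_list):
--     for i in range(0, len(string_list)):
--         string_list[i] = string_list[i].lower()
--     return string_list
-- ===== SOURCE B (Python) =====
-- def analyse_string(string_list, delete, start, end, lower_case):
--     # Single pass: clean each element and collect survivors; then mutate the
--     # original list in place (as A does) and return it.
--     result = []
--     for s in string_list:
--         if delete is not None:
--             for char in delete:
--                 s = s.replace(char, '')
--         if len(s) == 0 or s.isdigit():
--             continue
--         s = s.rstrip(end).lstrip(start)
--         if len(s) == 0:
--             continue
--         result.append(s.lower() if lower_case else s)
--     string_list[:] = result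
--     return string_list
-- ===== Notes on version B (the rewrite author's own statement) =====
-- stated objective: simpler
-- what changed: Replaces A's four passes (in-place delete-replace pass, index-collecting strip/skip loop, offset-corrected deletion by indices, lowercase pass) with one pass that cleans each element and appends survivors to a result list.
import Mathlib
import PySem

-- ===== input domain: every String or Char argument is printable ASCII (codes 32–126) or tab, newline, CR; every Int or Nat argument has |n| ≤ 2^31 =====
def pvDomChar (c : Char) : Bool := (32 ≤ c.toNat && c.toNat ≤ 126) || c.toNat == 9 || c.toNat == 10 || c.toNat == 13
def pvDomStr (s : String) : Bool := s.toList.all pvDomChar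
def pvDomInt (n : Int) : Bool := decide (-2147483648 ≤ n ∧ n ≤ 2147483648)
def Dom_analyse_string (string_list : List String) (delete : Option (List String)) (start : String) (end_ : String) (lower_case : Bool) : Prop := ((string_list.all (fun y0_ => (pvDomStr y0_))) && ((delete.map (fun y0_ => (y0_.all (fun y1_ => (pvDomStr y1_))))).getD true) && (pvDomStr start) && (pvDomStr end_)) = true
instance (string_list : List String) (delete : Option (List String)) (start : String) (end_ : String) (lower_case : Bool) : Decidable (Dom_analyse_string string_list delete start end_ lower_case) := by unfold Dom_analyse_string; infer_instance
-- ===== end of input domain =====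

-- B merges A's four passes (delete-replace, strip/skip loop collecting indices,
-- offset-corrected deletion, lowercase pass) into one pass building a result list (objective:
-- simpler). A mutates string_list in place and returns it; Source B performs the same final
-- in-place mutation; the equivalence proved here is about the return value.

-- ===== PORT A =====
-- while string_list[i][-1] in end: string_list[i] = string_list[i][:-1]; break when empty
-- ('c in end' for the single char c is exactly membership, ported as List.contains)
def endLoopA (cs : List Char) (s : List Char) : List Char :=
  match h : s.getLast? with
  | none => []
  | some c => if cs.contains c then endLoopA cs s.dropLast else s
termination_by s.length
decreasing_by
  cases s with
  | nil => simp at h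
  | cons a t => simp

-- while string_list[i][0] in start: string_list[i] = string_list[i][1:]; break when empty
def startLoopA (cs : List Char) : List Char → List Char
  | [] => []
  | c :: rest => if cs.contains c then startLoopA cs rest else c :: rest

-- the main 'for i in range(0, len(string_list))' loop: rewrites each element in place and
-- records the indices of skipped items (delete_items); k is the running index i
def mainLoopA (startCs endCs : List Char) (k : Nat) : List String → List String × List Nat
  | [] => ([], [])
  | s :: rest =>
    let cs := s.toList
    let (v, skip) :=
      if cs.length == 0 || PySem.Chars.strIsdigit cs then (cs, true)
      else
        let t := endLoopA endCs cs
        if t.isEmpty then (t, true)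
        else
          let u := startLoopA startCs t
          if u.isEmpty then (u, true) else (u, false)
    let (vs, ds) := mainLoopA startCs endCs (k + 1) rest
    (String.ofList v :: vs, if skip then k :: ds else ds)

-- helper delete_null_items: 'del string_list[i - offset]; offset += 1' over delete_items
def delete_null_items (string_list : List String) (delete_items : List Nat) : List String :=
  (delete_items.foldl (fun (st : List String × Nat) i => (st.1.eraseIdx (i - st.2), st.2 + 1))
    (string_list, 0)).1

-- helper list_lower: 'string_list[i] = string_list[i].lower()' for every i
def list_lower (string_list : List String) : List String :=
  string_list.map PySem.Str.lower

def analyse_string (string_list : List String) (delete : Option (List String)) (start : String) (end_ : String) (lower_case : Bool) : List String :=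
  let sl1 := match delete with
    | none => string_list
    | some del => string_list.map (fun s => del.foldl (fun t ch => PySem.Str.replace t ch "") s)
  let (ps, ds) := mainLoopA start.toList end_.toList 0 sl1
  let sl2 := delete_null_items ps ds
  if lower_case then list_lower sl2 else sl2

-- ===== PORT B =====
-- s.rstrip(chars) / s.lstrip(chars): drop characters belonging to chars from that side
-- (exact: Python strips while the end character is a member of the chars argument)
def rstripCs (cs s : List Char) : List Char := (s.reverse.dropWhile cs.contains).reverse
def lstripCs (cs s : List Char) : List Char := s.dropWhile cs.contains

def analyse_string_alt (string_list : List String) (delete : Option (List String)) (start : String) (end_ : String) (lower_case : Bool) : List String :=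
  string_list.foldl (fun acc s =>
    let s1 := match delete with
      | none => s.toList
      | some del => (del.foldl (fun t ch => PySem.Str.replace t ch "") s).toList
    if s1.length == 0 || PySem.Chars.strIsdigit s1 then acc
    else
      let s2 := lstripCs start.toList (rstripCs end_.toList s1)
      if s2.length == 0 then acc
      else acc ++ [String.ofList (if lower_case then PySem.Chars.lower s2 else s2)]) []

-- ===== PRECONDITION & SPEC =====
def Spec_analyse_string (string_list : List String) (delete : Option (List String)) (start : String) (end_ : String) (lower_case : Bool) (out : List String) : Prop := out = analyse_string_alt string_list delete start end_ lower_case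
instance (string_list : List String) (delete : Option (List String)) (start : String) (end_ : String) (lower_case : Bool) (out : List String) : Decidable (Spec_analyse_string string_list delete start end_ lower_case out) := by unfold Spec_analyse_string; infer_instance

-- ===== CLAIM (what is proved, stated in full; the proofs are below) =====
def Claim_equal_analyse_string : Prop := ∀ (string_list : List String) (delete : Option (List String)) (start : String) (end_ : String) (lower_case : Bool), Dom_analyse_string string_list delete start end_ lower_case → Spec_analyse_string string_list delete start end_ lower_case (analyse_string string_list delete start end_ lower_case)

-- ===== LEMMAS AND PROOFS =====

-- per-element processing of A's main loop (value after stripping, skip flag)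
def stepA (startCs endCs : List Char) (cs : List Char) : List Char × Bool :=
  if cs.length == 0 || PySem.Chars.strIsdigit cs then (cs, true)
  else
    let t := endLoopA endCs cs
    if t.isEmpty then (t, true)
    else
      let u := startLoopA startCs t
      if u.isEmpty then (u, true) else (u, false)

-- the character list each element is processed from (after the delete-replace phase)
def repl (delete : Option (List String)) (s : String) : List Char :=
  match delete with
  | none => s.toList
  | some del => (del.foldl (fun t ch => PySem.Str.replace t ch "") s).toList

def gA0 (startCs endCs : List Char) (s : String) : String × Bool :=
  (String.ofList (stepA startCs endCs s.toList).1, (stepA startCs endCs s.toList).2)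

def gA (startCs endCs : List Char) (delete : Option (List String)) (s : String) : String × Bool :=
  (String.ofList (stepA startCs endCs (repl delete s)).1, (stepA startCs endCs (repl delete s)).2)

-- indices of the skipped elements, counting from k
def skipIdxsP (k : Nat) : List (String × Bool) → List Nat
  | [] => []
  | p :: rest => if p.2 then k :: skipIdxsP (k + 1) rest else skipIdxsP (k + 1) rest

-- recursive form of delete_null_items' fold
def foldDel : List String → Nat → List Nat → List String
  | l, _, [] => l
  | l, o, i :: is => foldDel (l.eraseIdx (i - o)) (o + 1) is

-- per-element result of B, before the optional lowering
def procB0 (startCs endCs : List Char) (cs : List Char) : Option String :=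
  if cs.length == 0 || PySem.Chars.strIsdigit cs then none
  else
    let s2 := lstripCs startCs (rstripCs endCs cs)
    if s2.length == 0 then none else some (String.ofList s2)

lemma ofList_lower (v : List Char) :
    PySem.Str.lower (String.ofList v) = String.ofList (PySem.Chars.lower v) := by
  simp [PySem.Str.lower]

lemma endLoopA_nil (cs : List Char) : endLoopA cs [] = [] := by
  rw [endLoopA]; split <;> simp_all

lemma endLoopA_concat (cs l : List Char) (a : Char) :
    endLoopA cs (l ++ [a]) = if cs.contains a then endLoopA cs l else l ++ [a] := by
  rw [endLoopA]
  split
  · simp_all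
  · rename_i c h
    rw [List.getLast?_concat] at h
    cases h
    simp

lemma endLoopA_eq (cs s : List Char) : endLoopA cs s = rstripCs cs s := by
  induction s using List.reverseRecOn with
  | nil => simp [endLoopA_nil, rstripCs]
  | append_singleton l a ih =>
    rw [endLoopA_concat]
    by_cases h : a ∈ cs
    · simp [h, rstripCs, ih]
    · simp [h, rstripCs]

lemma startLoopA_eq (cs s : List Char) : startLoopA cs s = lstripCs cs s := by
  induction s with
  | nil => simp [startLoopA, lstripCs]
  | cons c rest ih =>
    by_cases h : c ∈ cs <;>
      simp [startLoopA, lstripCs, h, ih]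

lemma stepA_procB0 (st en cs : List Char) :
    (if (stepA st en cs).2 then none else some (String.ofList (stepA st en cs).1))
      = procB0 st en cs := by
  simp only [stepA, procB0, startLoopA_eq, endLoopA_eq]
  by_cases h1 : (cs.length == 0 || PySem.Chars.strIsdigit cs) = true
  · simp [h1]
  · simp only [h1, if_neg, Bool.not_eq_true]
    by_cases h2 : (rstripCs en cs).isEmpty
    · have : rstripCs en cs = [] := by simpa [List.isEmpty_iff] using h2
      simp [this, lstripCs]
    · by_cases h3 : (lstripCs st (rstripCs en cs)).isEmpty
      · have : lstripCs st (rstripCs en cs) = [] := by simpa [List.isEmpty_iff] using h3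
        simp [h2, this]
      · have : lstripCs st (rstripCs en cs) ≠ [] := by simpa [List.isEmpty_iff] using h3
        simp [h2, this]

lemma mainLoopA_eq (st en : List Char) : ∀ (sl : List String) (k : Nat),
    mainLoopA st en k sl
      = ((sl.map (gA0 st en)).map Prod.fst, skipIdxsP k (sl.map (gA0 st en))) := by
  intro sl
  induction sl with
  | nil => intro k; rfl
  | cons s rest ih =>
    intro k
    have hstep : (if s.toList.length == 0 || PySem.Chars.strIsdigit s.toList then (s.toList, true)
        else
          let t := endLoopA en s.toList
          if t.isEmpty then (t, true)
          else
            let u := startLoopA st t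
            if u.isEmpty then (u, true) else (u, false)) = stepA st en s.toList := rfl
    rcases hsp : stepA st en s.toList with ⟨v, sk⟩
    rw [hsp] at hstep
    simp only [mainLoopA, hstep, ih, List.map_cons]
    have hg : gA0 st en s = (String.ofList v, sk) := by simp [gA0, hsp]
    rw [hg]
    cases sk <;> simp [skipIdxsP]

lemma eraseIdx_middle (pre l : List String) (x : String) :
    (pre ++ x :: l).eraseIdx pre.length = pre ++ l := by
  rw [List.eraseIdx_append_of_length_le (Nat.le_refl _)]
  simp

lemma foldDel_skipIdxsP : ∀ (ps : List (String × Bool)) (pre : List String) (o : Nat),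
    foldDel (pre ++ ps.map Prod.fst) o (skipIdxsP (pre.length + o) ps)
      = pre ++ (ps.filter (fun p => !p.2)).map Prod.fst := by
  intro ps
  induction ps with
  | nil => intro pre o; simp [skipIdxsP, foldDel]
  | cons p rest ih =>
    intro pre o
    cases hp : p.2
    · have h2 : pre.length + o + 1 = (pre ++ [p.1]).length + o := by simp; omega
      have h3 : pre ++ List.map Prod.fst (p :: rest)
          = (pre ++ [p.1]) ++ rest.map Prod.fst := by simp
      rw [skipIdxsP]
      simp only [hp, if_neg, Bool.false_eq_true, not_false_iff]
      rw [h3, h2, ih (pre ++ [p.1]) o]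
      simp [hp]
    · rw [skipIdxsP]
      simp only [hp, if_pos]
      rw [foldDel]
      have h1 : pre.length + o - o = pre.length := by omega
      rw [List.map_cons, h1, eraseIdx_middle]
      have h2 : pre.length + o + 1 = pre.length + (o + 1) := by omega
      rw [h2, ih pre (o + 1)]
      simp [hp]

lemma delete_null_items_eq (sl : List String) (ds : List Nat) :
    delete_null_items sl ds = foldDel sl 0 ds := by
  suffices h : ∀ ds l o,
      (List.foldl (fun (st : List String × Nat) i => (st.1.eraseIdx (i - st.2), st.2 + 1)) (l, o) ds).1
        = foldDel l o ds by
    exact h ds sl 0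
  intro ds
  induction ds with
  | nil => intro l o; rfl
  | cons i is ih => intro l o; simp [List.foldl, foldDel, ih]

lemma B_fold (delete : Option (List String)) (start end_ : String) (lc : Bool) :
    ∀ (sl acc : List String),
    List.foldl (fun acc s =>
      let s1 := match delete with
        | none => s.toList
        | some del => (del.foldl (fun t ch => PySem.Str.replace t ch "") s).toList
      if s1.length == 0 || PySem.Chars.strIsdigit s1 then acc
      else
        let s2 := lstripCs start.toList (rstripCs end_.toList s1)
        if s2.length == 0 then acc
        else acc ++ [String.ofList (if lc then PySem.Chars.lower s2 else s2)]) acc sl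
    = acc ++ sl.filterMap (fun s => (procB0 start.toList end_.toList (repl delete s)).map
        (fun v => if lc then PySem.Str.lower v else v)) := by
  intro sl
  induction sl with
  | nil => intro acc; simp
  | cons s rest ih =>
    intro acc
    rw [List.foldl_cons, ih, List.filterMap_cons]
    cases delete with
    | none =>
      simp only [repl, procB0]
      by_cases h1 : (s.toList.length == 0 || PySem.Chars.strIsdigit s.toList) = true
      · rw [if_pos h1, if_pos h1]; simp
      · rw [if_neg h1, if_neg h1]
        by_cases h2 : ((lstripCs start.toList (rstripCs end_.toList s.toList)).length == 0) = true
        · rw [if_pos h2, if_pos h2]; simp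
        · rw [if_neg h2, if_neg h2]
          cases lc <;> simp [ofList_lower, List.append_assoc]
    | some del =>
      simp only [repl, procB0]
      by_cases h1 : ((del.foldl (fun t ch => PySem.Str.replace t ch "") s).toList.length == 0
          || PySem.Chars.strIsdigit (del.foldl (fun t ch => PySem.Str.replace t ch "") s).toList) = true
      · rw [if_pos h1, if_pos h1]; simp
      · rw [if_neg h1, if_neg h1]
        by_cases h2 : ((lstripCs start.toList (rstripCs end_.toList
            (del.foldl (fun t ch => PySem.Str.replace t ch "") s).toList)).length == 0) = true
        · rw [if_pos h2, if_pos h2]; simp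
        · rw [if_neg h2, if_neg h2]
          cases lc <;> simp [ofList_lower, List.append_assoc]

lemma B_eq_filterMap (sl : List String) (delete : Option (List String)) (start end_ : String) (lc : Bool) :
    analyse_string_alt sl delete start end_ lc
      = sl.filterMap (fun s => (procB0 start.toList end_.toList (repl delete s)).map
          (fun v => if lc then PySem.Str.lower v else v)) := by
  rw [analyse_string_alt]
  refine Eq.trans (List.foldl_ext _ _ _ ?_) ((B_fold delete start end_ lc sl []).trans (List.nil_append _))
  intro a b _
  cases delete <;> rfl

lemma map_gA0_repl (st en : List Char) (delete : Option (List String)) (sl : List String) :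
    (match delete with
      | none => sl
      | some del => sl.map (fun s => del.foldl (fun t ch => PySem.Str.replace t ch "") s)).map (gA0 st en)
      = sl.map (gA st en delete) := by
  cases delete with
  | none => rfl
  | some del => rw [List.map_map]; rfl

lemma A_filter_eq (st en : List Char) (delete : Option (List String)) :
    ∀ sl : List String,
    ((sl.map (gA st en delete)).filter (fun p => !p.2)).map Prod.fst
      = sl.filterMap (fun s => procB0 st en (repl delete s)) := by
  intro sl
  induction sl with
  | nil => rfl
  | cons s rest ih =>
    have h := stepA_procB0 st en (repl delete s)
    rw [List.map_cons, List.filter_cons, List.filterMap_cons, ← h]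
    cases hp : (stepA st en (repl delete s)).2 <;>
      simp [gA, hp, ih]

-- ===== VERDICT (by name: the statement is the Claim_ definition above) =====
theorem analyse_string_spec : Claim_equal_analyse_string := by
  intro sl delete start end_ lc _
  unfold Spec_analyse_string
  rw [B_eq_filterMap]
  have hps := foldDel_skipIdxsP ((sl.map (gA start.toList end_.toList delete))) [] 0
  simp only [List.nil_append, List.length_nil, Nat.zero_add] at hps
  simp only [analyse_string, mainLoopA_eq, map_gA0_repl, delete_null_items_eq, hps]
  rw [A_filter_eq]
  cases lc with
  | false => simp
  | true => simp [list_lower, List.map_filterMap]
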